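-- pv_equiv track=rewrite | github.com/suryanjain14/prat | bringimg_gun_to_fight.py | mirroring
-- ===== SOURCE A (Python) =====
-- def mirroring(mirror, coordinates, dimensions):
--     transformed_res = coordinates
--     mirror_rotation = [2 * coordinates, 2 * (dimensions - coordinates)]
--     if mirror < 0:
--         for i in range(mirror, 0):
--             transformed_res -= mirror_rotation[(i + 1) % 2]
--     else:
--         for i in range(mirror, 0, -1):
--             transformed_res += mirror_rotation[i % 2]
--     return transformed_res
-- ===== SOURCE B (Python) =====
-- def mirroring(mirror, coordinates, dimensions):
--     # Closed form: the loop adds/subtracts 2*coordinates for each even index and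
--     # 2*(dimensions - coordinates) for each odd index; count them directly.
--     m = abs(mirror)
--     evens = m // 2          # even indices hit by the loop
--     odds = (m + 1) // 2     # odd indices hit by the loop
--     if mirror >= 0:
--         return coordinates + 2 * coordinates * evens + 2 * (dimensions - coordinates) * odds
--     else:
--         return coordinates - 2 * coordinates * odds - 2 * (dimensions - coordinates) * evens
-- ===== Notes on version B (the rewrite author's own statement) =====
-- stated objective: faster
-- what changed: Replaces the O(|mirror|) reflection loop with a closed-form formula: count the even and odd loop indices (m//2 and (m+1)//2) and multiply them by the two reflection step values.
import Mathlib
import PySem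

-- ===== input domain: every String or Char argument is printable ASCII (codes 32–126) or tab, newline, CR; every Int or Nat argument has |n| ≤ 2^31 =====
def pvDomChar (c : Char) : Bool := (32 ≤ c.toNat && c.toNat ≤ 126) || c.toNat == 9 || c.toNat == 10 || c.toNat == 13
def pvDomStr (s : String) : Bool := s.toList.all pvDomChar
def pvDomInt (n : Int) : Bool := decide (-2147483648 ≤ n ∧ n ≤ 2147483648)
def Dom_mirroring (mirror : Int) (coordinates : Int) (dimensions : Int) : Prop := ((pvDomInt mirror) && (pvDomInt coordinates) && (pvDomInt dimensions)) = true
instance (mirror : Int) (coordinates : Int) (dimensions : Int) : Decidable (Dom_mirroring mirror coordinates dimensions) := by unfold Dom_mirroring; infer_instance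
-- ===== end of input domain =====

-- B replaces A's O(|mirror|) loop by closed-form arithmetic counting the even/odd loop indices (objective: faster).

-- ===== PORT A =====
-- xs[(i+1) % 2] / xs[i % 2] always index in range (the list has length 2), so pyGetD is exact here.
def mirroring (mirror : Int) (coordinates : Int) (dimensions : Int) : Int :=
  let mirror_rotation : List Int := [2 * coordinates, 2 * (dimensions - coordinates)]
  if mirror < 0 then
    (PySem.List.pyRange mirror 0 1).foldl
      (fun acc i => acc - PySem.List.pyGetD mirror_rotation (PySem.Int.mod (i + 1) 2) 0) coordinates
  else
    (PySem.List.pyRange mirror 0 (-1)).foldl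
      (fun acc i => acc + PySem.List.pyGetD mirror_rotation (PySem.Int.mod i 2) 0) coordinates

-- ===== PORT B =====
def mirroring_alt (mirror : Int) (coordinates : Int) (dimensions : Int) : Int :=
  let m := |mirror|
  let evens := PySem.Int.floordiv m 2
  let odds := PySem.Int.floordiv (m + 1) 2
  if mirror ≥ 0 then
    coordinates + 2 * coordinates * evens + 2 * (dimensions - coordinates) * odds
  else
    coordinates - 2 * coordinates * odds - 2 * (dimensions - coordinates) * evens

-- ===== PRECONDITION & SPEC =====
def Spec_mirroring (mirror : Int) (coordinates : Int) (dimensions : Int) (out : Int) : Prop := out = mirroring_alt mirror coordinates dimensions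
instance (mirror : Int) (coordinates : Int) (dimensions : Int) (out : Int) : Decidable (Spec_mirroring mirror coordinates dimensions out) := by unfold Spec_mirroring; infer_instance

-- ===== CLAIM (what is proved, stated in full; the proofs are below) =====
def Claim_equal_mirroring : Prop := ∀ (mirror : Int) (coordinates : Int) (dimensions : Int), Dom_mirroring mirror coordinates dimensions → Spec_mirroring mirror coordinates dimensions (mirroring mirror coordinates dimensions)

-- ===== LEMMAS AND PROOFS =====

lemma pv_foldl_sub {α : Type} (l : List α) (g : α → Int) (a : Int) :
    l.foldl (fun acc x => acc - g x) a = a - (l.map g).sum := by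
  induction l generalizing a with
  | nil => simp
  | cons x xs ih => simp [ih]; ring

lemma pv_foldl_add {α : Type} (l : List α) (g : α → Int) (a : Int) :
    l.foldl (fun acc x => acc + g x) a = a + (l.map g).sum := by
  induction l generalizing a with
  | nil => simp
  | cons x xs ih => simp [ih]; ring

lemma pv_sum_pos (c d : Int) (n : Nat) :
    ((PySem.List.pyRange n 0 (-1)).map
      (fun i => PySem.List.pyGetD [2 * c, 2 * (d - c)] (PySem.Int.mod i 2) 0)).sum
    = 2 * c * ((n / 2 : Nat) : Int) + 2 * (d - c) * (((n + 1) / 2 : Nat) : Int) := by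
  induction n with
  | zero => simp [PySem.List.pyRange_neg_one_eq_nil]
  | succ n ih =>
    rw [show ((n + 1 : Nat) : Int) = (n : Int) + 1 by push_cast; ring]
    rw [PySem.List.pyRange_neg_one_cons (by positivity)]
    rw [List.map_cons, List.sum_cons]
    rw [show (n : Int) + 1 - 1 = (n : Int) by ring, ih]
    rw [PySem.Int.mod_eq_emod_of_pos (by norm_num)]
    rcases Nat.even_or_odd n with ⟨k, hk⟩ | ⟨k, hk⟩
    · subst hk
      rw [show ((k + k : Nat) : Int) + 1 = (2 * k + 1 : Int) by push_cast; ring]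
      rw [show ((2 * k + 1 : Int)) % 2 = 1 by omega]
      rw [show (k + k) / 2 = k from by omega, show (k + k + 1) / 2 = k from by omega,
          show (k + k + 1 + 1) / 2 = k + 1 from by omega]
      simp [PySem.List.pyGetD]
      ring
    · subst hk
      rw [show ((2 * k + 1 : Nat) : Int) + 1 = (2 * k + 2 : Int) by push_cast; ring]
      rw [show ((2 * k + 2 : Int)) % 2 = 0 by omega]
      rw [show (2 * k + 1) / 2 = k from by omega, show (2 * k + 1 + 1) / 2 = k + 1 from by omega,
          show (2 * k + 1 + 1 + 1) / 2 = k + 1 from by omega]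
      simp [PySem.List.pyGetD]
      ring

lemma pv_sum_neg (c d : Int) (n : Nat) :
    ((PySem.List.pyRange (-(n : Int)) 0 1).map
      (fun i => PySem.List.pyGetD [2 * c, 2 * (d - c)] (PySem.Int.mod (i + 1) 2) 0)).sum
    = 2 * c * (((n + 1) / 2 : Nat) : Int) + 2 * (d - c) * ((n / 2 : Nat) : Int) := by
  induction n with
  | zero => simp [PySem.List.pyRange_one_eq_nil]
  | succ n ih =>
    rw [show (-((n + 1 : Nat) : Int)) = -(n : Int) - 1 by push_cast; ring]
    rw [PySem.List.pyRange_one_cons (by omega)]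
    rw [List.map_cons, List.sum_cons]
    rw [show (-(n : Int) - 1 + 1) = -(n : Int) by ring, ih]
    rw [PySem.Int.mod_eq_emod_of_pos (by norm_num)]
    rcases Nat.even_or_odd n with ⟨k, hk⟩ | ⟨k, hk⟩
    · subst hk
      rw [show (-(((k + k : Nat)) : Int)) % 2 = 0 by push_cast; omega]
      rw [show (k + k) / 2 = k from by omega, show (k + k + 1) / 2 = k from by omega,
          show (k + k + 1 + 1) / 2 = k + 1 from by omega]
      simp [PySem.List.pyGetD]
      ring
    · subst hk
      rw [show (-(((2 * k + 1 : Nat)) : Int)) % 2 = 1 by push_cast; omega]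
      rw [show (2 * k + 1) / 2 = k from by omega, show (2 * k + 1 + 1) / 2 = k + 1 from by omega,
          show (2 * k + 1 + 1 + 1) / 2 = k + 1 from by omega]
      simp [PySem.List.pyGetD]
      ring

-- ===== VERDICT (by name: the statement is the Claim_ definition above) =====
theorem mirroring_spec : Claim_equal_mirroring := by
  intro mirror c d _
  unfold Spec_mirroring mirroring mirroring_alt
  by_cases h : mirror < 0
  · rw [if_pos h, if_neg (by omega)]
    obtain ⟨n, hn⟩ : ∃ n : Nat, mirror = -(n : Int) :=
      ⟨(-mirror).toNat, by omega⟩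
    subst hn
    rw [pv_foldl_sub, pv_sum_neg c d n]
    have habs : |(-(n : Int))| = (n : Int) := by
      rw [abs_neg]; exact abs_of_nonneg (by positivity)
    rw [habs]
    rw [PySem.Int.floordiv_eq_ediv_of_pos (by norm_num),
        PySem.Int.floordiv_eq_ediv_of_pos (by norm_num)]
    have h1 : ((n : Int)) / 2 = ((n / 2 : Nat) : Int) := by omega
    have h2 : ((n : Int) + 1) / 2 = (((n + 1) / 2 : Nat) : Int) := by omega
    rw [h1, h2]
    ring
  · rw [if_neg h, if_pos (by omega)]
    obtain ⟨n, hn⟩ : ∃ n : Nat, mirror = (n : Int) := ⟨mirror.toNat, by omega⟩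
    subst hn
    rw [pv_foldl_add, pv_sum_pos c d n]
    rw [abs_of_nonneg (by positivity)]
    rw [PySem.Int.floordiv_eq_ediv_of_pos (by norm_num),
        PySem.Int.floordiv_eq_ediv_of_pos (by norm_num)]
    have h1 : ((n : Int)) / 2 = ((n / 2 : Nat) : Int) := by omega
    have h2 : ((n : Int) + 1) / 2 = (((n + 1) / 2 : Nat) : Int) := by omega
    rw [h1, h2]
    ring
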